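-- pv_equiv track=rewrite | github.com/arturmbrasil/backpropagation | util.py | codigoToLetra
-- ===== SOURCE A (Python) =====
-- def codigoToLetra(codigo):
--     letras = {
--         "A": [1, -1, -1, -1, -1, -1, -1],
--         "B": [-1, 1, -1, -1, -1, -1, -1],
--         "C": [-1, -1, 1, -1, -1, -1, -1],
--         "D": [-1, -1, -1, 1, -1, -1, -1],
--         "E": [-1, -1, -1, -1, 1, -1, -1],
--         "J": [-1, -1, -1, -1, -1, 1, -1],
--         "K": [-1, -1, -1, -1, -1, -1, 1],
--     }
--
--     for letra in letras:
--         if letras[letra] == codigo: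
--             return letra
--
--     return "Erro"
-- ===== SOURCE B (Python) =====
-- def codigoToLetra(codigo):
--     # Locate the single hot index instead of comparing against a table of patterns.
--     if len(codigo) == 7 and codigo.count(1) == 1 and codigo.count(-1) == 6:
--         return "ABCDEJK"[codigo.index(1)]
--     return "Erro"
-- ===== Notes on version B (the rewrite author's own statement) =====
-- stated objective: simpler
-- what changed: Instead of comparing the input against a dict of seven full one-hot patterns, B checks once that the list is a 7-long one-hot vector (one 1, six -1) and indexes the letter string 'ABCDEJK' by the position of the 1.
import Mathlib
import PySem

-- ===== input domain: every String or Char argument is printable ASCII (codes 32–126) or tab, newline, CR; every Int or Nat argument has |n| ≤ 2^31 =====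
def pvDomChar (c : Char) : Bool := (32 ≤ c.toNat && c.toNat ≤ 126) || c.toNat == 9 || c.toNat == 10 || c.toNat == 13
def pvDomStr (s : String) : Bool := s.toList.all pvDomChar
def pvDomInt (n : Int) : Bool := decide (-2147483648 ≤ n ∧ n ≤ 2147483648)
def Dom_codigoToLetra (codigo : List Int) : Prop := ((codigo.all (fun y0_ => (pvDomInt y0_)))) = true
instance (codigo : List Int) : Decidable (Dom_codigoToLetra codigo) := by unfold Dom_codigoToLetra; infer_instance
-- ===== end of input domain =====

-- B replaces A's table of seven full one-hot patterns by a one-hot check plus indexing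
-- the letter string at the position of the single 1 (objective: simpler).

-- ===== PORT A =====
-- the dict 'letras' in insertion order
def pvLetras : List (String × List Int) :=
  [("A", [1, -1, -1, -1, -1, -1, -1]),
   ("B", [-1, 1, -1, -1, -1, -1, -1]),
   ("C", [-1, -1, 1, -1, -1, -1, -1]),
   ("D", [-1, -1, -1, 1, -1, -1, -1]),
   ("E", [-1, -1, -1, -1, 1, -1, -1]),
   ("J", [-1, -1, -1, -1, -1, 1, -1]),
   ("K", [-1, -1, -1, -1, -1, -1, 1])]

-- the 'for letra in letras: if letras[letra] == codigo: return letra' loop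
def pvFindLetra : List (String × List Int) → List Int → String
  | [], _ => "Erro"
  | (l, pat) :: rest, c => if pat = c then l else pvFindLetra rest c

def codigoToLetra (codigo : List Int) : String :=
  pvFindLetra pvLetras codigo

-- ===== PORT B =====
def codigoToLetra_alt (codigo : List Int) : String :=
  if codigo.length = 7 ∧ PySem.List.count codigo 1 = 1 ∧ PySem.List.count codigo (-1) = 6 then
    match PySem.List.index? codigo 1 with
    | some i =>
        match PySem.Str.pyGet? "ABCDEJK" (i : Int) with
        | some ch => String.ofList [ch]
        | none => "Erro"   -- unreachable: index of the 1 is < 7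
    | none => "Erro"       -- unreachable: count of 1 is 1
  else "Erro"

-- ===== PRECONDITION & SPEC =====
def Spec_codigoToLetra (codigo : List Int) (out : String) : Prop := out = codigoToLetra_alt codigo
instance (codigo : List Int) (out : String) : Decidable (Spec_codigoToLetra codigo out) := by unfold Spec_codigoToLetra; infer_instance

-- ===== CLAIM (what is proved, stated in full; the proofs are below) =====
def Claim_equal_codigoToLetra : Prop := ∀ (codigo : List Int), Dom_codigoToLetra codigo → Spec_codigoToLetra codigo (codigoToLetra codigo)

-- ===== LEMMAS AND PROOFS =====

-- counts of two distinct values never exceed the length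
theorem pv_count_le (l : List Int) : l.count 1 + l.count (-1) ≤ l.length := by
  induction l with
  | nil => simp
  | cons a t ih =>
    simp only [List.count_cons, List.length_cons, beq_iff_eq]
    by_cases h1 : a = 1
    · subst h1; simp; omega
    · by_cases h2 : a = -1
      · subst h2; simp; omega
      · simp [h1, h2]; omega

-- if the counts of 1 and -1 fill the whole list, every element is 1 or -1
theorem pv_all_pm (l : List Int) (h : l.count 1 + l.count (-1) = l.length) :
    ∀ x ∈ l, x = 1 ∨ x = -1 := by
  induction l with
  | nil => intro x hx; simp at hx
  | cons a t ih =>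
    have hle : t.count 1 + t.count (-1) ≤ t.length := pv_count_le t
    simp only [List.count_cons, List.length_cons, beq_iff_eq] at h
    have hhead : a = 1 ∨ a = -1 := by
      by_cases h1 : a = 1
      · exact Or.inl h1
      · by_cases h2 : a = -1
        · exact Or.inr h2
        · rw [if_neg h1, if_neg h2] at h; omega
    have htail : t.count 1 + t.count (-1) = t.length := by
      rcases hhead with rfl | rfl
      · rw [if_pos rfl, if_neg (by decide)] at h; omega
      · rw [if_neg (by decide), if_pos rfl] at h; omega
    intro x hx
    rcases List.mem_cons.mp hx with rfl | hxt
    · exact hhead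
    · exact ih htail x hxt

theorem pv_main (c : List Int) : codigoToLetra c = codigoToLetra_alt c := by
  by_cases hcond : c.length = 7 ∧ PySem.List.count c 1 = 1 ∧ PySem.List.count c (-1) = 6
  · obtain ⟨hlen, h1, h2⟩ := hcond
    rw [PySem.List.count_eq] at h1 h2
    have hall : ∀ x ∈ c, x = 1 ∨ x = -1 := pv_all_pm c (by omega)
    rcases c with _ | ⟨a, _ | ⟨b, _ | ⟨d, _ | ⟨e, _ | ⟨f, _ | ⟨g, _ | ⟨k, _ | ⟨m, t⟩⟩⟩⟩⟩⟩⟩⟩ <;>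
      simp only [List.length_nil, List.length_cons] at hlen <;> try omega
    have ha := hall a (by simp)
    have hb := hall b (by simp)
    have hd := hall d (by simp)
    have he := hall e (by simp)
    have hf := hall f (by simp)
    have hg := hall g (by simp)
    have hk := hall k (by simp)
    clear hall hlen
    rcases ha with rfl | rfl <;> rcases hb with rfl | rfl <;> rcases hd with rfl | rfl <;>
      rcases he with rfl | rfl <;> rcases hf with rfl | rfl <;> rcases hg with rfl | rfl <;>
      rcases hk with rfl | rfl <;> revert h1 h2 <;> decide
  · have hb : codigoToLetra_alt c = "Erro" := by
      unfold codigoToLetra_alt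
      rw [if_neg hcond]
    rw [hb]
    have h0 : ¬ ([1, -1, -1, -1, -1, -1, -1] : List Int) = c := by rintro rfl; exact hcond (by decide)
    have h1 : ¬ ([-1, 1, -1, -1, -1, -1, -1] : List Int) = c := by rintro rfl; exact hcond (by decide)
    have h2 : ¬ ([-1, -1, 1, -1, -1, -1, -1] : List Int) = c := by rintro rfl; exact hcond (by decide)
    have h3 : ¬ ([-1, -1, -1, 1, -1, -1, -1] : List Int) = c := by rintro rfl; exact hcond (by decide)
    have h4 : ¬ ([-1, -1, -1, -1, 1, -1, -1] : List Int) = c := by rintro rfl; exact hcond (by decide)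
    have h5 : ¬ ([-1, -1, -1, -1, -1, 1, -1] : List Int) = c := by rintro rfl; exact hcond (by decide)
    have h6 : ¬ ([-1, -1, -1, -1, -1, -1, 1] : List Int) = c := by rintro rfl; exact hcond (by decide)
    unfold codigoToLetra
    simp only [pvLetras, pvFindLetra]
    rw [if_neg h0, if_neg h1, if_neg h2, if_neg h3, if_neg h4, if_neg h5, if_neg h6]

-- ===== VERDICT (by name: the statement is the Claim_ definition above) =====
theorem codigoToLetra_spec : Claim_equal_codigoToLetra := by
  intro c _
  exact pv_main c
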